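-- pv_equiv track=rewrite | github.com/craigholland/context-atlas | src/context_atlas/services/assembly.py | _count_summary
-- ===== SOURCE A (Python) =====
-- from collections.abc import Iterable, Mapping
--
-- def _count_summary(values: Iterable[str]) -> str:
--     """Return first-seen value counts as a stable comma-separated summary."""
--
--     counts: dict[str, int] = {}
--     for value in values:
--         normalized = value.strip()
--         if not normalized:
--             continue
--         counts[normalized] = counts.get(normalized, 0) + 1
--     return ",".join(f"{value}={count}" for value, count in counts.items())
-- ===== SOURCE B (Python) =====
-- def _count_summary(values):
--     """Return first-seen value counts as a stable comma-separated summary."""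
--     normalized = [v.strip() for v in values if v.strip()]
--     parts = []
--     while normalized:
--         v = normalized[0]
--         rest = [x for x in normalized if x != v]
--         parts.append(f"{v}={len(normalized) - len(rest)}")
--         normalized = rest
--     return ",".join(parts)
-- ===== Notes on version B (the rewrite author's own statement) =====
-- stated objective: alternative
-- what changed: Replaces A's single-pass incremental dict counting with an extract-and-remove loop: repeatedly take the first remaining normalized token, obtain its count as the length difference after filtering out all its occurrences, emit its part, and continue on the filtered remainder (no dict or counter at all).
import Mathlib
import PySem

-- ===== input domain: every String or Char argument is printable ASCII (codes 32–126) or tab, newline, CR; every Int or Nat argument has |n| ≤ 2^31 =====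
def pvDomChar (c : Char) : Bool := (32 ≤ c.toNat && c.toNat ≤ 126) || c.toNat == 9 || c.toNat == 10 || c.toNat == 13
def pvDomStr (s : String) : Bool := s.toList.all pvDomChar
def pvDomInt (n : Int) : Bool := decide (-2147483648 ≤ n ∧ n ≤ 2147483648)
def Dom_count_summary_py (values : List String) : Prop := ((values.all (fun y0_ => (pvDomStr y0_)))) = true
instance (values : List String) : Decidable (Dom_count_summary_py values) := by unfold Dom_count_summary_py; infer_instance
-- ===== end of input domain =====

-- B replaces A's incremental dict-counting pass with an extract-and-remove loop:
-- repeatedly take the first remaining token, count it by a length difference after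
-- filtering out all its occurrences, and recurse on the remainder; objective: alternative.

-- ===== PORT A =====
def count_summary_py (values : List String) : String :=
  let counts : PySem.Dict String Int :=
    values.foldl (fun d value =>
      let normalized := PySem.Str.strip value
      if normalized = "" then d
      else d.insert normalized (d.getD normalized 0 + 1)) PySem.Dict.empty
  PySem.Str.join "," (counts.items.map (fun p => p.1 ++ "=" ++ PySem.Int.toStr p.2))

-- ===== PORT B =====
-- the while-loop of Source B: head token, filter it out of the whole list, count = length difference
def csParts : List String → List String
  | [] => []
  | v :: t =>
    let rest := (v :: t).filter (fun x => !(x == v))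
    (v ++ "=" ++ PySem.Int.toStr (((v :: t).length : Int) - (rest.length : Int)))
      :: csParts rest
  termination_by ns => ns.length
  decreasing_by
    simp only [List.filter_cons, beq_self_eq_true, Bool.not_true, List.length_cons]
    exact Nat.lt_succ_of_le (List.length_filter_le _ _)

def count_summary_py_alt (values : List String) : String :=
  let normalized := (values.filter (fun v => !(PySem.Str.strip v == ""))).map PySem.Str.strip
  PySem.Str.join "," (csParts normalized)

-- ===== PRECONDITION & SPEC =====
def Spec_count_summary_py (values : List String) (out : String) : Prop := out = count_summary_py_alt values
instance (values : List String) (out : String) : Decidable (Spec_count_summary_py values out) := by unfold Spec_count_summary_py; infer_instance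

-- ===== CLAIM (what is proved, stated in full; the proofs are below) =====
def Claim_equal_count_summary_py : Prop := ∀ (values : List String), Dom_count_summary_py values → Spec_count_summary_py values (count_summary_py values)

-- ===== LEMMAS AND PROOFS =====

-- A's skip-empties counting loop is the counting loop over the normalized list.
lemma foldl_strip_fuse (xs : List String) (d : PySem.Dict String Int) :
    xs.foldl (fun d value =>
      let normalized := PySem.Str.strip value
      if normalized = "" then d
      else d.insert normalized (d.getD normalized 0 + 1)) d
    = ((xs.filter (fun v => !(PySem.Str.strip v == ""))).map PySem.Str.strip).foldl
        (fun d n => d.insert n (d.getD n 0 + 1)) d := by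
  induction xs generalizing d with
  | nil => rfl
  | cons x xs ih =>
    by_cases h : PySem.Str.strip x = ""
    · simp [List.foldl, List.filter, h, ih]
    · have hb : (PySem.Str.strip x == "") = false := by
        simpa [beq_eq_false_iff_ne] using h
      simp [List.foldl, List.filter, hb, ih, if_neg h]

-- building a set from elements that are never v keeps a leading v :: prefix intact
lemma foldl_add_cons_of_not_mem (v : String) :
    ∀ (xs : List String) (s : List String), (∀ x ∈ xs, x ≠ v) →
      xs.foldl PySem.Set.add (v :: s) = v :: xs.foldl PySem.Set.add s := by
  intro xs
  induction xs with
  | nil => intro s _; rfl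
  | cons x xs ih =>
    intro s h
    have hxv : x ≠ v := h x (by simp)
    have hxs : ∀ y ∈ xs, y ≠ v := fun y hy => h y (by simp [hy])
    simp only [List.foldl]
    have hc : (v :: s).contains x = s.contains x := by
      simp [hxv]
    have : PySem.Set.add (v :: s) x = v :: PySem.Set.add s x := by
      simp only [PySem.Set.add, PySem.Set.contains, hc]
      split <;> rfl
    rw [this, ih _ hxs]

-- adding elements equal to v is a no-op once v is in the set
lemma foldl_add_filter_mem (v : String) :
    ∀ (xs : List String) (s : List String), v ∈ s →
      xs.foldl PySem.Set.add s = (xs.filter (fun x => !(x == v))).foldl PySem.Set.add s := by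
  intro xs
  induction xs with
  | nil => intro s _; rfl
  | cons x xs ih =>
    intro s hv
    by_cases hx : x = v
    · subst hx
      have hadd : PySem.Set.add s x = s := by
        simp only [PySem.Set.add, PySem.Set.contains]
        simp [hv]
      simp only [List.filter_cons, beq_self_eq_true, Bool.not_true, List.foldl, hadd]
      exact ih _ hv
    · have hb : (x == v) = false := by simpa using hx
      simp only [List.filter_cons, hb, Bool.not_false, if_pos, List.foldl]
      have hv' : v ∈ PySem.Set.add s x := by
        simp only [PySem.Set.add, PySem.Set.contains]
        split <;> simp [hv]
      exact ih _ hv'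

-- first-seen dedup of v :: t is v followed by the dedup of t with the v's removed
lemma ofList_cons_filter (v : String) (t : List String) :
    PySem.Set.ofList (v :: t)
      = v :: PySem.Set.ofList (t.filter (fun x => !(x == v))) := by
  have h1 : PySem.Set.ofList (v :: t) = t.foldl PySem.Set.add [v] := by
    rw [PySem.Set.ofList_eq_foldl]
    simp only [List.foldl]
    congr 1
  rw [h1, foldl_add_filter_mem v t [v] (by simp)]
  have hne : ∀ x ∈ t.filter (fun x => !(x == v)), x ≠ v := by
    intro x hx
    have := List.of_mem_filter hx
    simpa using this
  rw [PySem.Set.ofList_eq_foldl]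
  exact foldl_add_cons_of_not_mem v (t.filter (fun x => !(x == v))) [] hne

-- removing every occurrence of v shortens a list by exactly its count of v
lemma length_filter_ne_add_count (l : List String) (v : String) :
    (l.filter (fun x => !(x == v))).length + l.count v = l.length := by
  have h := List.length_eq_countP_add_countP (fun x => !(x == v)) (l := l)
  have hc : l.count v = l.countP (fun x => x == v) := by
    simp [List.count]
  have hnot : l.countP (fun x => ¬(!(x == v)) = true) = l.countP (fun x => x == v) :=
    List.countP_congr (by intro x _; simp)
  simp only [List.countP_eq_length_filter] at h hc hnot
  omega

-- B's extract-and-remove loop produces exactly Counter-style (token, count) parts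
lemma csParts_eq (n : Nat) : ∀ ns : List String, ns.length ≤ n →
    csParts ns = (PySem.Set.ofList ns).map
      (fun k => k ++ "=" ++ PySem.Int.toStr ((ns.count k : Nat) : Int)) := by
  induction n with
  | zero =>
    intro ns h
    have : ns = [] := List.eq_nil_of_length_eq_zero (Nat.le_zero.mp h)
    subst this; simp [csParts]
  | succ n ih =>
    intro ns h
    match ns with
    | [] => simp [csParts]
    | v :: t =>
      have hrest : (t.filter (fun x => !(x == v))).length ≤ n := by
        have := List.length_filter_le (fun x => !(x == v)) t
        simp only [List.length_cons] at h
        omega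
      rw [csParts, ofList_cons_filter]
      have hfilter : (v :: t).filter (fun x => !(x == v)) = t.filter (fun x => !(x == v)) := by
        simp
      rw [hfilter, List.map_cons, ih _ hrest]
      congr 1
      · -- head: length difference equals the count of v
        congr 1
        congr 1
        have hsplit := length_filter_ne_add_count (v :: t) v
        rw [hfilter] at hsplit
        omega
      · -- tail: counts of k ≠ v are unchanged by filtering v out
        apply List.map_congr_left
        intro k hk
        have hkmem : k ∈ t.filter (fun x => !(x == v)) :=
          (PySem.Set.mem_ofList _ k).mp hk
        have hkv : k ≠ v := by
          have := List.of_mem_filter hkmem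
          simpa using this
        have h1 : (t.filter (fun x => !(x == v))).count k = t.count k := by
          apply List.count_filter
          simp [hkv]
        have h2 : (v :: t).count k = t.count k := by
          simp [Ne.symm hkv]
        rw [h1, h2]

-- the previous lemma with the fuel argument discharged
lemma csParts_spec (ns : List String) :
    csParts ns = (PySem.Set.ofList ns).map
      (fun k => k ++ "=" ++ PySem.Int.toStr ((ns.count k : Nat) : Int)) :=
  csParts_eq ns.length ns le_rfl

-- ===== VERDICT (by name: the statement is the Claim_ definition above) =====
theorem count_summary_py_spec : Claim_equal_count_summary_py := by
  intro values _
  unfold Spec_count_summary_py count_summary_py count_summary_py_alt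
  rw [foldl_strip_fuse, PySem.Dict.foldl_insert_getD_add_one_eq_counter]
  simp only [csParts_spec, PySem.Dict.items_counter, List.map_map, Function.comp_def]
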